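-- pv_equiv track=rewrite | github.com/daniel-reich/ubiquitous-fiesta | 9Px2rkc9TPhK54wDb_3.py | ecg_seq_index
-- ===== SOURCE A (Python) =====
-- def share(x,y):
--     if x>y:
--         for i in range(2,y+1):
--             if x%i==0 and y%i==0:
--                 return True
--         return False
--     else:
--         for i in range(2,x+1):
--             if x%i==0 and y%i==0:
--                 return True
--         return False
--
-- def ecg_seq_index(x):
--     s=[1,2]
--     data=3
--     while True:
--
--         if x in s:
--             return s.index(x)
--         elif share(s[-1],data):
--             if data not in s:
--                 s.append(data)
--                 data=3
--             else:
--                 data+=1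
--         else:
--             data+=1
-- ===== SOURCE B (Python) =====
-- def gcd(a, b):
--     while b:
--         a, b = b, a % b
--     return a
--
-- def ecg_seq_index(x):
--     if x == 1:
--         return 0
--     if x == 2:
--         return 1
--     used = {1, 2}
--     prev = 2
--     idx = 2
--     while True:
--         d = 3
--         while d in used or gcd(prev, d) == 1:
--             d += 1
--         if d == x:
--             return idx
--         used.add(d)
--         prev = d
--         idx += 1
-- ===== Notes on version B (the rewrite author's own statement) =====
-- stated objective: faster
-- what changed: B replaces A's single flat loop (which re-scans the whole list for membership/index on every candidate increment and tests common factors by trial division up to min(x,y)) with a per-term candidate scan using an O(1) set for used values, a Euclidean gcd for the common-factor test, and a running index counter, with the two base cases returned up front.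
import Mathlib
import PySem

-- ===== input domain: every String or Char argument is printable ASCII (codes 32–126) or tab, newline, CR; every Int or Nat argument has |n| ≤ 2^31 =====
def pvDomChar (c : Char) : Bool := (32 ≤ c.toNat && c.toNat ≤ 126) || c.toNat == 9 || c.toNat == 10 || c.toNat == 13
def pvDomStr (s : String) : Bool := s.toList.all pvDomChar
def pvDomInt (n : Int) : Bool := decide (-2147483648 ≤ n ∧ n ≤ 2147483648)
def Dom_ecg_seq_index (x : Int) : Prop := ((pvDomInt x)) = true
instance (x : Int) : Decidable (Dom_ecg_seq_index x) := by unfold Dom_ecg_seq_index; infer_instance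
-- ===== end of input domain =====

-- B replaces A's flat scan (list membership + trial-division factor test each step) by a
-- per-term candidate scan over a set of used values with a Euclidean gcd test; faster.
-- Both Pythons loop forever when x never appears: the ports make that 'while True' total
-- with a fuel bound, consumed in lockstep (one unit per loop iteration on each side,
-- A's detection of x lagging exactly one iteration behind B's).

-- ===== PORT A =====
-- share(x, y): trial division over range(2, min(x,y)+1); early-return True = List.any
def pvShare (x y : Int) : Bool :=
  if x > y then
    (PySem.List.pyRange 2 (y + 1) 1).any
      (fun i => (PySem.Int.mod x i == 0) && (PySem.Int.mod y i == 0))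
  else
    (PySem.List.pyRange 2 (x + 1) 1).any
      (fun i => (PySem.Int.mod x i == 0) && (PySem.Int.mod y i == 0))

-- A's 'while True' loop; fuel only makes it total (s[-1] via pyGetD: s is never empty)
def pvLoopA (x : Int) (s : List Int) (data : Int) : Nat → Int
  | 0 => -1
  | f + 1 =>
    if s.contains x then (((PySem.List.index? s x).getD 0 : Nat) : Int)
    else if pvShare (PySem.List.pyGetD s (-1) 0) data then
      if s.contains data then pvLoopA x s (data + 1) f
      else pvLoopA x (s ++ [data]) 3 f
    else pvLoopA x s (data + 1) f

def ecg_seq_index (x : Int) : Int := pvLoopA x [1, 2] 3 ((x.natAbs + 2) ^ 3 + 1)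

-- ===== PORT B =====
-- Source B's hand-written Euclidean gcd: while b: a, b = b, a % b
def pvGcd (a b : Int) : Int :=
  if h : b = 0 then a else pvGcd b (PySem.Int.mod a b)
termination_by b.natAbs
decreasing_by
  rcases lt_or_gt_of_ne h with hb | hb
  · have := PySem.Int.mod_neg_bounds a hb
    omega
  · have h1 := PySem.Int.mod_nonneg a hb
    have h2 := PySem.Int.mod_lt a hb
    omega

-- B's outer 'while True' with its inner candidate scan, fused into one recursion;
-- one unit of fuel per iteration of either loop
def pvLoopB (x : Int) (used : PySem.Set Int) (prev idx d : Int) : Nat → Int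
  | 0 => -1
  | f + 1 =>
    if PySem.Set.contains used d || (pvGcd prev d == 1) then
      pvLoopB x used prev idx (d + 1) f
    else if d == x then idx
    else pvLoopB x (PySem.Set.add used d) d (idx + 1) 3 f

def ecg_seq_index_alt (x : Int) : Int :=
  if x == 1 then 0
  else if x == 2 then 1
  else pvLoopB x (PySem.Set.ofList [1, 2]) 2 2 3 ((x.natAbs + 2) ^ 3)

-- ===== PRECONDITION & SPEC =====
def Spec_ecg_seq_index (x : Int) (out : Int) : Prop := out = ecg_seq_index_alt x
instance (x : Int) (out : Int) : Decidable (Spec_ecg_seq_index x out) := by unfold Spec_ecg_seq_index; infer_instance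

-- ===== CLAIM (what is proved, stated in full; the proofs are below) =====
def Claim_equal_ecg_seq_index : Prop := ∀ (x : Int), Dom_ecg_seq_index x → Spec_ecg_seq_index x (ecg_seq_index x)

-- ===== LEMMAS AND PROOFS =====

theorem pvNatAbs_emod (a b : Int) (ha : 0 ≤ a) (hb : 0 < b) :
    (a % b).natAbs = a.natAbs % b.natAbs := by
  have h1 : a % b = (a.natAbs : Int) % (b.natAbs : Int) := by
    rw [Int.natAbs_of_nonneg ha, Int.natAbs_of_nonneg hb.le]
  have h2 : ((a.natAbs : Int) % (b.natAbs : Int)) = ((a.natAbs % b.natAbs : Nat) : Int) := by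
    push_cast; ring
  rw [h1, h2, Int.natAbs_natCast]

theorem pvGcd_emod (a b : Int) (ha : 0 ≤ a) (hb : 0 < b) :
    Int.gcd a b = Int.gcd b (a % b) := by
  rw [Int.gcd, Int.gcd, pvNatAbs_emod a b ha hb, Nat.gcd_comm a.natAbs, Nat.gcd_rec]
  exact Nat.gcd_comm _ _

-- Source B's Euclid computes Int.gcd on nonnegative inputs
theorem pvGcd_eq_aux : ∀ (n : Nat) (a b : Int), b.natAbs ≤ n → 0 ≤ a → 0 ≤ b →
    pvGcd a b = (Int.gcd a b : Int) := by
  intro n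
  induction n with
  | zero =>
    intro a b hn ha hb
    have hb0 : b = 0 := by omega
    subst hb0
    rw [pvGcd]
    simp [Int.gcd, Int.natAbs_of_nonneg ha]
  | succ m ih =>
    intro a b hn ha hb
    rw [pvGcd]
    by_cases hb0 : b = 0
    · subst hb0; simp [Int.gcd, Int.natAbs_of_nonneg ha]
    · have hbpos : 0 < b := lt_of_le_of_ne hb (Ne.symm hb0)
      simp only [hb0, dite_false]
      rw [PySem.Int.mod_eq_emod_of_pos hbpos]
      have h1 : 0 ≤ a % b := Int.emod_nonneg a hb0
      have h2 : a % b < b := Int.emod_lt_of_pos a hbpos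
      have h3 : (a % b).natAbs ≤ m := by omega
      rw [ih b (a % b) h3 hb h1, pvGcd_emod a b ha hbpos]

theorem pvGcd_eq (a b : Int) (ha : 0 ≤ a) (hb : 0 ≤ b) : pvGcd a b = (Int.gcd a b : Int) :=
  pvGcd_eq_aux b.natAbs a b le_rfl ha hb

-- one arm of A's trial-division scan
theorem pvScan_iff (a b c : Int) :
    ((PySem.List.pyRange 2 (c + 1) 1).any
      (fun i => (PySem.Int.mod a i == 0) && (PySem.Int.mod b i == 0))) = true ↔
    ∃ i : Int, 2 ≤ i ∧ i ≤ c ∧ i ∣ a ∧ i ∣ b := by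
  simp only [List.any_eq_true, PySem.List.mem_pyRange_one, Bool.and_eq_true, beq_iff_eq,
    PySem.Int.mod_eq_zero_iff_dvd]
  constructor
  · rintro ⟨i, ⟨h1, h2⟩, h3, h4⟩
    exact ⟨i, h1, by omega, h3, h4⟩
  · rintro ⟨i, h1, h2, h3, h4⟩
    exact ⟨i, ⟨h1, by omega⟩, h3, h4⟩

-- the trial-division scan of A succeeds iff gcd > 1
theorem pvShare_iff (a b : Int) (ha : 2 ≤ a) (hb : 2 ≤ b) :
    pvShare a b = true ↔ 1 < Int.gcd a b := by
  have key : (∃ i : Int, 2 ≤ i ∧ i ≤ min a b ∧ i ∣ a ∧ i ∣ b) ↔ 1 < Int.gcd a b := by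
    constructor
    · rintro ⟨i, h1, _, h3, h4⟩
      have hpos : 0 < Int.gcd a b := Int.gcd_pos_of_ne_zero_left b (by omega)
      have hi : ((i.toNat : Nat) : Int) = i := Int.toNat_of_nonneg (by omega)
      have hk : i.toNat ∣ Int.gcd a b :=
        Int.dvd_gcd (by rw [hi]; exact h3) (by rw [hi]; exact h4)
      have hle : i.toNat ≤ Int.gcd a b := Nat.le_of_dvd hpos hk
      omega
    · intro hg
      refine ⟨(Int.gcd a b : Int), by exact_mod_cast hg, ?_,
        Int.gcd_dvd_left a b, Int.gcd_dvd_right a b⟩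
      have h1 : (Int.gcd a b : Int) ≤ a := Int.le_of_dvd (by omega) (Int.gcd_dvd_left a b)
      have h2 : (Int.gcd a b : Int) ≤ b := Int.le_of_dvd (by omega) (Int.gcd_dvd_right a b)
      omega
  unfold pvShare
  by_cases hab : a > b
  · simp only [hab, if_true, pvScan_iff]
    rw [← key]
    constructor
    · rintro ⟨i, h1, h2, h3, h4⟩; exact ⟨i, h1, by omega, h3, h4⟩
    · rintro ⟨i, h1, h2, h3, h4⟩; exact ⟨i, h1, by omega, h3, h4⟩
  · simp only [hab, if_false, pvScan_iff]
    rw [← key]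
    constructor
    · rintro ⟨i, h1, h2, h3, h4⟩; exact ⟨i, h1, by omega, h3, h4⟩
    · rintro ⟨i, h1, h2, h3, h4⟩; exact ⟨i, h1, by omega, h3, h4⟩

-- lockstep simulation: one unit of fuel per loop iteration on each side, A one iteration behind
theorem pvSim (x : Int) : ∀ (f : Nat) (s : List Int) (used : PySem.Set Int) (prev idx d : Int),
    s ≠ [] → PySem.List.pyGetD s (-1) 0 = prev → idx = (s.length : Int) → x ∉ s →
    (∀ y, y ∈ used ↔ y ∈ s) → 2 ≤ prev → 3 ≤ d →
    pvLoopA x s d (f + 1) = pvLoopB x used prev idx d f := by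
  intro f
  induction f with
  | zero =>
    intro s used prev idx d h1 h2 h3 h4 h5 h6 h7
    have hcx : s.contains x = false := by simp [h4]
    rw [pvLoopA, hcx]
    simp only [Bool.false_eq_true, if_false]
    rw [pvLoopB]
    split_ifs <;> rfl
  | succ g ih =>
    intro s used prev idx d h1 h2 h3 h4 h5 h6 h7
    have hcx : s.contains x = false := by simp [h4]
    have hshare := pvShare_iff prev d h6 (by omega)
    have hgcd : pvGcd prev d = (Int.gcd prev d : Int) := pvGcd_eq prev d (by omega) (by omega)
    have hGpos : 0 < Int.gcd prev d := Int.gcd_pos_of_ne_zero_left d (by omega)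
    rw [pvLoopA, hcx]
    simp only [Bool.false_eq_true, if_false]
    rw [pvLoopB, h2]
    by_cases hds : d ∈ s
    · -- d already used: both sides step to the next candidate d+1
      have hcd : s.contains d = true := by simp [hds]
      have hucd : PySem.Set.contains used d = true := by
        simp [PySem.Set.contains_eq_listContains, (h5 d).mpr hds]
      rw [hucd]
      simp only [Bool.true_or, if_true, hcd]
      have hstep := ih s used prev idx (d + 1) h1 h2 h3 h4 h5 h6 (by omega)
      split_ifs <;> exact hstep
    · have hcd : s.contains d = false := by simp [hds]
      have hucd : PySem.Set.contains used d = false := by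
        simp [PySem.Set.contains_eq_listContains]
        intro hmem; exact hds ((h5 d).mp hmem)
      rw [hucd]
      simp only [Bool.false_or]
      by_cases hg : Int.gcd prev d = 1
      · -- no common factor: both sides step to the next candidate d+1
        have hsf : pvShare prev d = false := by
          rw [Bool.eq_false_iff]
          intro hc
          have := hshare.mp hc
          omega
        have hgb : (pvGcd prev d == 1) = true := by simp [hgcd, hg]
        simp only [hsf, hgb, Bool.false_eq_true, if_false, if_true]
        exact ih s used prev idx (d + 1) h1 h2 h3 h4 h5 h6 (by omega)
      · -- common factor and unused: the term d is appended / detected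
        have hst : pvShare prev d = true := hshare.mpr (by omega)
        have hgb : (pvGcd prev d == 1) = false := by
          simp only [hgcd, beq_eq_false_iff_ne, ne_eq]
          exact_mod_cast fun h => hg (by exact_mod_cast h)
        simp only [hst, if_true, hcd, Bool.false_eq_true, if_false, hgb]
        by_cases hdx : d = x
        · -- this term IS x: B returns idx now, A detects it one iteration later
          subst hdx
          simp only [BEq.rfl, if_true]
          rw [pvLoopA]
          have hc : (s ++ [d]).contains d = true := by simp
          rw [hc]
          simp only [if_true]
          rw [PySem.List.index?_append_singleton_self s d h4]
          simp [h3]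
        · have hbx : (d == x) = false := by simp [hdx]
          rw [hbx]
          simp only [Bool.false_eq_true, if_false]
          refine ih (s ++ [d]) (PySem.Set.add used d) d (idx + 1) 3 (by simp)
            (PySem.List.pyGetD_neg_one_append_singleton s d 0) ?_ ?_ ?_ (by omega) (by omega)
          · simp [h3]
          · simp only [List.mem_append, List.mem_singleton]
            rintro (h | h)
            · exact h4 h
            · exact hdx h.symm
          · intro y
            rw [PySem.Set.mem_add, h5 y]
            simp

-- ===== VERDICT (by name: the statement is the Claim_ definition above) =====
theorem ecg_seq_index_spec : Claim_equal_ecg_seq_index := by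
  intro x _
  unfold Spec_ecg_seq_index ecg_seq_index ecg_seq_index_alt
  by_cases hx1 : x = 1
  · subst hx1
    rw [pvLoopA]
    simp only [show ((1:Int) == 1) = true from rfl, if_true]
    norm_num [PySem.List.index?]
  · by_cases hx2 : x = 2
    · subst hx2
      rw [pvLoopA]
      simp only [show ((2:Int) == 1) = false from rfl, show ((2:Int) == 2) = true from rfl,
        Bool.false_eq_true, if_false, if_true]
      decide
    · have hb1 : (x == 1) = false := by simp [hx1]
      have hb2 : (x == 2) = false := by simp [hx2]
      rw [hb1, hb2]
      simp only [Bool.false_eq_true, if_false]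
      refine pvSim x ((x.natAbs + 2) ^ 3) [1, 2] (PySem.Set.ofList [1, 2]) 2 2 3
        (by simp) (by decide) (by decide) ?_ ?_ (by omega) (by omega)
      · simp [hx1, hx2]
      · intro y
        rw [PySem.Set.mem_ofList]
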